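-- pv_equiv track=rewrite | github.com/sux2mfgj/knapsack | hill_climbing.py | get_neighbor_results
-- ===== SOURCE A (Python) =====
-- import copy
--
-- def get_neighbor_results(ln, n, d) -> [[int]]:
--     result = []
--     for i in range(0, ln):
--         local_result = []
--         for j in range(0, i + 1):
--             tmp = copy.deepcopy(d[i])
--             tmp[j] += 1
--             if (n - 1) > 0:
--                 local_result.append(copy.deepcopy(tmp))
--         if (n - 2) > 0:
--             result.extend(
--                 get_neighbor_results(i + 1, n - 1,
--                                      copy.deepcopy(local_result)))
--         else:
--             result.extend(copy.deepcopy(local_result))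
--
--     return result
-- ===== SOURCE B (Python) =====
-- def get_neighbor_results(ln, n, d):
--     # Enumerate index chains ln > i >= t1 >= t2 >= ... directly, carrying one
--     # working vector per chain, instead of materialising intermediate neighbor
--     # dictionaries and deep-copying them at every recursion level.
--     if n < 2:
--         return []
--     result = []
--
--     def walk(k, bound, vec):
--         if k == 0:
--             result.append(vec)
--             return
--         for t in range(bound):
--             v2 = vec.copy()
--             v2[t] += 1
--             walk(k - 1, t + 1, v2)
--
--     for i in range(ln):
--         walk(n - 1, i + 1, list(d[i]))
--     return result
-- ===== Notes on version B (the rewrite author's own statement) =====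
-- stated objective: alternative
-- what changed: B replaces A's recursion over freshly built and repeatedly deep-copied intermediate neighbor dictionaries by a direct depth-first enumeration of non-increasing index chains, carrying a single working vector with one copy-and-increment per level.
import Mathlib
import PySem

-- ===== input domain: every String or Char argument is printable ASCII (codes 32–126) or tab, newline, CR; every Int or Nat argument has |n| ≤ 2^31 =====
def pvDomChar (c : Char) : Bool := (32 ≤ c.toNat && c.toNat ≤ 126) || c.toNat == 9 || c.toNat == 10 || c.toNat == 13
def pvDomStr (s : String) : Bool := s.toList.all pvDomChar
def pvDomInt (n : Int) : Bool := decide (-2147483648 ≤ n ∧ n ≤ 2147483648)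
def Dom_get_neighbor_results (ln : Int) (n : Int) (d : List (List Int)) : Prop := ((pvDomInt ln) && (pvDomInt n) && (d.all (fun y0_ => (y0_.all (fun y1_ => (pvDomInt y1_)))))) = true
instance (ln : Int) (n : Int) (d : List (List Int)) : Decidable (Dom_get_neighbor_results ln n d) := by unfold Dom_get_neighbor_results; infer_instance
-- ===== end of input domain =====

-- B replaces A's recursion over freshly built (and deep-copied) neighbor dictionaries by a
-- direct enumeration of index chains carrying one working vector; return values only
-- (A never mutates its arguments observably — it deep-copies).

-- ===== PORT A =====
-- A recurses with n decreased by 1 while n ≥ 3; fuel = n.toNat is an exact bound on the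
-- recursion depth, so the dead fuel-0 branch is never reached on any input of the claim.
def gnrAuxA : Nat → Int → Int → List (List Int) → List (List Int)
  | fuel, ln, n, d =>
    (PySem.List.pyRange 0 ln 1).foldl
      (fun result i =>
        let local_result :=
          (PySem.List.pyRange 0 (i + 1) 1).foldl
            (fun lr j =>
              let tmp := PySem.List.pySetD (PySem.List.pyGetD d i [])
                  j (PySem.List.pyGetD (PySem.List.pyGetD d i []) j 0 + 1)
              if n - 1 > 0 then lr ++ [tmp] else lr) []
        if n - 2 > 0 then
          result ++ (if _h : fuel = 0 then [] else gnrAuxA (fuel - 1) (i + 1) (n - 1) local_result)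
        else result ++ local_result) []
  termination_by fuel _ _ _ => fuel
  decreasing_by omega

def get_neighbor_results (ln : Int) (n : Int) (d : List (List Int)) : List (List Int) :=
  gnrAuxA n.toNat ln n d

-- ===== PORT B =====
-- walk(k, bound, vec): emit vec when k = 0, else branch on t < bound with vec[t] += 1 on a copy.
def walkB : Nat → Int → List Int → List (List Int)
  | 0, _, vec => [vec]
  | k + 1, bound, vec =>
    (PySem.List.pyRange 0 bound 1).foldl
      (fun acc t =>
        acc ++ walkB k (t + 1) (PySem.List.pySetD vec t (PySem.List.pyGetD vec t 0 + 1))) []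
  termination_by k _ _ => k

def get_neighbor_results_alt (ln : Int) (n : Int) (d : List (List Int)) : List (List Int) :=
  if n < 2 then []
  else
    (PySem.List.pyRange 0 ln 1).foldl
      (fun acc i => acc ++ walkB (n - 1).toNat (i + 1) (PySem.List.pyGetD d i [])) []

-- ===== PRECONDITION & SPEC =====
-- Pre_ excludes exactly the inputs on which A raises IndexError: it indexes d[i] for every
-- i < ln and increments position j ≤ i of d[i], so each listed row must exist and be long enough.
def Pre_get_neighbor_results (ln : Int) (n : Int) (d : List (List Int)) : Prop :=
  ln ≤ (d.length : Int) ∧ ∀ i ∈ List.range (min ln.toNat d.length), i < (d.getD i []).length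
instance (ln : Int) (n : Int) (d : List (List Int)) : Decidable (Pre_get_neighbor_results ln n d) := by unfold Pre_get_neighbor_results; infer_instance

def pvWitness_get_neighbor_results : Int × Int × List (List Int) := (2, 3, [[0], [1, 2]])

def Spec_get_neighbor_results (ln : Int) (n : Int) (d : List (List Int)) (out : List (List Int)) : Prop := out = get_neighbor_results_alt ln n d
instance (ln : Int) (n : Int) (d : List (List Int)) (out : List (List Int)) : Decidable (Spec_get_neighbor_results ln n d out) := by unfold Spec_get_neighbor_results; infer_instance

-- ===== CLAIM (what is proved, stated in full; the proofs are below) =====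
def Claim_equal_get_neighbor_results : Prop := ∀ (ln : Int) (n : Int) (d : List (List Int)), Dom_get_neighbor_results ln n d → Pre_get_neighbor_results ln n d → Spec_get_neighbor_results ln n d (get_neighbor_results ln n d)

-- ===== LEMMAS AND PROOFS =====

theorem walkB_zero (bound : Int) (vec : List Int) : walkB 0 bound vec = [vec] := by
  rw [walkB]

theorem walkB_succ (k : Nat) (bound : Int) (vec : List Int) :
    walkB (k + 1) bound vec =
      (PySem.List.pyRange 0 bound 1).foldl
        (fun acc t =>
          acc ++ walkB k (t + 1) (PySem.List.pySetD vec t (PySem.List.pyGetD vec t 0 + 1))) [] := by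
  rw [walkB]

theorem gnrAuxA_low (fuel : Nat) (ln n : Int) (d : List (List Int)) (h : n ≤ 1) :
    gnrAuxA fuel ln n d = [] := by
  rw [gnrAuxA]
  have h1 : ¬ ((1:Int) < n) := by omega
  have h2 : ¬ ((2:Int) < n) := by omega
  simp [h1, h2]

theorem gnrAuxA_main (k : Nat) : ∀ (ln n : Int) (d : List (List Int)),
    n.toNat = k → Pre_get_neighbor_results ln n d →
    gnrAuxA k ln n d = get_neighbor_results_alt ln n d := by
  induction k with
  | zero =>
    intro ln n d hk _
    rw [gnrAuxA_low _ _ _ _ (by omega)]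
    simp only [get_neighbor_results_alt, if_pos (show n < 2 by omega)]
  | succ f ih =>
    intro ln n d hk hpre
    by_cases hlow : n ≤ 1
    · rw [gnrAuxA_low _ _ _ _ hlow]
      simp only [get_neighbor_results_alt, if_pos (show n < 2 by omega)]
    · by_cases h2 : n = 2
      · subst h2
        rw [gnrAuxA]
        simp only [get_neighbor_results_alt]
        rw [if_neg (by norm_num : ¬ ((2:Int) < 2))]
        apply PySem.List.foldl_congr_mem
        intro acc i _
        have c1 : (2:Int) - 1 > 0 := by norm_num
        have c2 : ¬ ((2:Int) - 2 > 0) := by norm_num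
        simp only [if_pos c1, if_neg c2, PySem.List.foldl_append_singleton_eq_map,
          List.nil_append]
        have h1 : ((2:Int) - 1).toNat = 0 + 1 := by norm_num
        rw [h1, walkB_succ]
        simp only [walkB_zero, PySem.List.foldl_append_singleton_eq_map, List.nil_append]
      · have h3 : 3 ≤ n := by omega
        rw [gnrAuxA]
        simp only [get_neighbor_results_alt]
        rw [if_neg (by omega : ¬ (n < 2))]
        apply PySem.List.foldl_congr_mem
        intro acc i hi
        obtain ⟨hi0, hiln⟩ := PySem.List.mem_pyRange_one.1 hi
        have c1 : n - 1 > 0 := by omega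
        have c2 : n - 2 > 0 := by omega
        simp only [if_pos c1, if_pos c2, dif_neg (Nat.succ_ne_zero f), Nat.add_sub_cancel,
          PySem.List.foldl_append_singleton_eq_map, List.nil_append]
        -- facts about row i
        obtain ⟨hlen, hrows⟩ := hpre
        have hiPre1 : i.toNat < d.length := by omega
        have hiPre2 : i.toNat < (d.getD i.toNat []).length :=
          hrows i.toNat (List.mem_range.2 (by omega))
        have hbase : PySem.List.pyGetD d i ([] : List Int) = d.getD i.toNat [] := by
          have hcast : i = ((i.toNat : Nat) : Int) := (Int.toNat_of_nonneg hi0).symm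
          rw [hcast, PySem.List.pyGetD_natCast]
          have hmax : ((i.toNat : Nat) : Int).toNat = i.toNat := by omega
          rw [hmax]
        -- the neighbor dictionary built from row i
        have hpreL : Pre_get_neighbor_results (i + 1) (n - 1)
            ((PySem.List.pyRange 0 (i + 1) 1).map fun j =>
              PySem.List.pySetD (PySem.List.pyGetD d i []) j
                (PySem.List.pyGetD (PySem.List.pyGetD d i []) j 0 + 1)) := by
          refine ⟨?_, ?_⟩
          · simp only [List.length_map, PySem.List.length_pyRange_one]; omega
          intro i2 hi2
          have hi2' : i2 < (i + 1).toNat := by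
            have := List.mem_range.1 hi2; omega
          have hL : ((PySem.List.pyRange 0 (i + 1) 1).map fun j =>
              PySem.List.pySetD (PySem.List.pyGetD d i []) j
                (PySem.List.pyGetD (PySem.List.pyGetD d i []) j 0 + 1)).getD i2 [] =
              PySem.List.pySetD (PySem.List.pyGetD d i []) (i2 : Int)
                (PySem.List.pyGetD (PySem.List.pyGetD d i []) (i2 : Int) 0 + 1) := by
            rw [← PySem.List.pyGetD_natCast]
            exact PySem.List.pyGetD_map_pyRange_of_nonneg _ _ _ _ (by omega) (by omega)
          rw [hL, PySem.List.length_pySetD, hbase]; omega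
        have hkf : (n - 1).toNat = f := by omega
        rw [ih (i + 1) (n - 1) _ hkf hpreL]
        simp only [get_neighbor_results_alt]
        rw [if_neg (by omega : ¬ (n - 1 < 2))]
        have hsucc : (n - 1).toNat = (n - 2).toNat + 1 := by omega
        rw [hsucc, walkB_succ]
        refine congrArg (fun x => acc ++ x) ?_
        simp only [show (n - 1 - 1 : Int) = n - 2 from by ring]
        apply PySem.List.foldl_congr_mem
        intro acc2 t ht
        obtain ⟨ht0, hti⟩ := PySem.List.mem_pyRange_one.1 ht
        rw [PySem.List.pyGetD_map_pyRange_of_nonneg _ _ _ _ ht0 (by omega)]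

-- ===== VERDICT (by name: the statement is the Claim_ definition above) =====
theorem get_neighbor_results_spec : Claim_equal_get_neighbor_results := by
  intro ln n d _ hpre
  exact gnrAuxA_main n.toNat ln n d rfl hpre
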